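-- pv_equiv track=rewrite | github.com/RJL08/Programacion-Inteligencia-Artifical | Tema 3/grafo_Actividad3.py | vecinos_de
-- ===== SOURCE A (Python) =====
-- aristas = [("S", "B", 4),("S", "D", 5),("B", "E", 1),("C", "G", 1),("D", "E", 2),("D", "H", 3),("E", "F", 6),
--     ("F", "G", 4),("G", "I", 3),("H", "J", 1),("I", "L", 4),("J", "K", 6),("K", "T", 2),("T", "L", 3)
-- ]
--
-- def vecinos_de(nodo):
--     vecinos = []
--     for origen, destino, peso in aristas:
--         if origen == nodo:
--             vecinos.append((destino, peso))
--         elif destino == nodo: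
--             vecinos.append((origen, peso))
--     return vecinos
-- ===== SOURCE B (Python) =====
-- aristas = [("S", "B", 4),("S", "D", 5),("B", "E", 1),("C", "G", 1),("D", "E", 2),("D", "H", 3),("E", "F", 6),
--     ("F", "G", 4),("G", "I", 3),("H", "J", 1),("I", "L", 4),("J", "K", 6),("K", "T", 2),("T", "L", 3)
-- ]
--
-- # The graph is a fixed module constant, so the adjacency table is written out
-- # once as a literal lookup table (neighbors in edge-list order, both directions).
-- _ADJ = {
--     "S": [("B", 4), ("D", 5)],
--     "B": [("S", 4), ("E", 1)],
--     "D": [("S", 5), ("E", 2), ("H", 3)],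
--     "E": [("B", 1), ("D", 2), ("F", 6)],
--     "C": [("G", 1)],
--     "G": [("C", 1), ("F", 4), ("I", 3)],
--     "H": [("D", 3), ("J", 1)],
--     "F": [("E", 6), ("G", 4)],
--     "I": [("G", 3), ("L", 4)],
--     "J": [("H", 1), ("K", 6)],
--     "L": [("I", 4), ("T", 3)],
--     "K": [("J", 6), ("T", 2)],
--     "T": [("K", 2), ("L", 3)],
-- }
--
-- def vecinos_de(nodo):
--     return list(_ADJ.get(nodo, []))
-- ===== Notes on version B (the rewrite author's own statement) =====
-- stated objective: idiomatic
-- what changed: Replaces the per-call linear scan of the edge list with a precomputed literal adjacency table (neighbors stored per node in edge-list order) consulted by a single dict lookup returning a copy.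
import Mathlib
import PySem

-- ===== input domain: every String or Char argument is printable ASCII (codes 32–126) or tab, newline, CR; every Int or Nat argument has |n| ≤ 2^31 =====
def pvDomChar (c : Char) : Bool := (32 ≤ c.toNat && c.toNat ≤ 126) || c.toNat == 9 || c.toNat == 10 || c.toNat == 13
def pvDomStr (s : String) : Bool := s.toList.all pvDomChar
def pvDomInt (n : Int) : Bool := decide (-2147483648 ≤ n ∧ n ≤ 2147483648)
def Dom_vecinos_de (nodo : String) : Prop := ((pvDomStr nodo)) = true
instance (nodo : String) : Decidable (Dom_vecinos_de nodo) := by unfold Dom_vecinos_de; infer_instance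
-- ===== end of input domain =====

-- B answers each query from a precomputed literal adjacency table instead of scanning the edge list per call; same values, same order.

-- ===== PORT A =====
def aristas : List (String × String × Int) :=
  [("S", "B", 4), ("S", "D", 5), ("B", "E", 1), ("C", "G", 1), ("D", "E", 2), ("D", "H", 3), ("E", "F", 6),
   ("F", "G", 4), ("G", "I", 3), ("H", "J", 1), ("I", "L", 4), ("J", "K", 6), ("K", "T", 2), ("T", "L", 3)]

def vecinos_de (nodo : String) : List (String × Int) :=
  aristas.foldl (fun vecinos e =>
    if e.1 == nodo then vecinos ++ [(e.2.1, e.2.2)]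
    else if e.2.1 == nodo then vecinos ++ [(e.1, e.2.2)]
    else vecinos) []

-- ===== PORT B =====
-- the literal adjacency table _ADJ from Source B
def pvADJ : PySem.Dict String (List (String × Int)) :=
  PySem.Dict.ofList
    [("S", [("B", 4), ("D", 5)]),
     ("B", [("S", 4), ("E", 1)]),
     ("D", [("S", 5), ("E", 2), ("H", 3)]),
     ("E", [("B", 1), ("D", 2), ("F", 6)]),
     ("C", [("G", 1)]),
     ("G", [("C", 1), ("F", 4), ("I", 3)]),
     ("H", [("D", 3), ("J", 1)]),
     ("F", [("E", 6), ("G", 4)]),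
     ("I", [("G", 3), ("L", 4)]),
     ("J", [("H", 1), ("K", 6)]),
     ("L", [("I", 4), ("T", 3)]),
     ("K", [("J", 6), ("T", 2)]),
     ("T", [("K", 2), ("L", 3)])]

def vecinos_de_alt (nodo : String) : List (String × Int) :=
  pvADJ.getD nodo []

-- ===== PRECONDITION & SPEC =====
def Spec_vecinos_de (nodo : String) (out : List (String × Int)) : Prop := out = vecinos_de_alt nodo
instance (nodo : String) (out : List (String × Int)) : Decidable (Spec_vecinos_de nodo out) := by unfold Spec_vecinos_de; infer_instance

-- ===== CLAIM (what is proved, stated in full; the proofs are below) =====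
def Claim_equal_vecinos_de : Prop := ∀ (nodo : String), Dom_vecinos_de nodo → Spec_vecinos_de nodo (vecinos_de nodo)

-- ===== LEMMAS AND PROOFS =====

-- the 13 node names appearing in aristas (= the keys of pvADJ)
def pvNodes : List String := ["S", "B", "D", "E", "C", "G", "H", "F", "I", "J", "L", "K", "T"]

lemma vecinos_de_of_not_mem (nodo : String) (h : nodo ∉ pvNodes) : vecinos_de nodo = [] := by
  simp only [pvNodes, List.mem_cons, not_or, List.not_mem_nil] at h
  obtain ⟨h1, h2, h3, h4, h5, h6, h7, h8, h9, h10, h11, h12, h13, -⟩ := h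
  simp [vecinos_de, aristas, List.foldl,
    (Ne.symm h1), (Ne.symm h2), (Ne.symm h3), (Ne.symm h4), (Ne.symm h5), (Ne.symm h6),
    (Ne.symm h7), (Ne.symm h8), (Ne.symm h9), (Ne.symm h10), (Ne.symm h11), (Ne.symm h12), (Ne.symm h13)]

lemma vecinos_de_alt_of_not_mem (nodo : String) (h : nodo ∉ pvNodes) : vecinos_de_alt nodo = [] := by
  have hkeys : pvADJ.keys = pvNodes := by decide
  have hc : pvADJ.contains nodo = false := by
    rw [PySem.Dict.contains_eq_decide_mem_keys, hkeys]
    simpa using h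
  simp [vecinos_de_alt, PySem.Dict.getD_of_not_contains pvADJ [] hc]

-- ===== VERDICT (by name: the statement is the Claim_ definition above) =====
theorem vecinos_de_spec : Claim_equal_vecinos_de := by
  intro nodo _
  unfold Spec_vecinos_de
  by_cases h : nodo ∈ pvNodes
  · simp only [pvNodes, List.mem_cons, List.not_mem_nil, or_false] at h
    rcases h with h | h | h | h | h | h | h | h | h | h | h | h | h <;> subst h <;> decide
  · rw [vecinos_de_of_not_mem nodo h, vecinos_de_alt_of_not_mem nodo h]
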